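-- pv_equiv track=rewrite | github.com/xinhaopan/luto-2.0 | luto/tools/__init__.py | mergeorderly
-- ===== SOURCE A (Python) =====
-- def mergeorderly(dict1, dict2):
--     """Return merged dictionary with keys in alphabetic order."""
--     list1 = list(dict1.keys())
--     list2 = list(dict2.keys())
--     lst = sorted(list1 + list2)
--     merged = {}
--     for key in lst:
--         if key in list1:
--             merged[key] = dict1[key]
--         else:
--             merged[key] = dict2[key]
--     return merged
-- ===== SOURCE B (Python) =====
-- def mergeorderly(dict1, dict2):
--     """Return merged dictionary with keys in alphabetic order."""
--     a = sorted(dict1.items(), key=lambda kv: kv[0])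
--     b = sorted(dict2.items(), key=lambda kv: kv[0])
--     res = []
--     i = j = 0
--     while i < len(a) and j < len(b):
--         if a[i][0] < b[j][0]:
--             res.append(a[i]); i += 1
--         elif b[j][0] < a[i][0]:
--             res.append(b[j]); j += 1
--         else:
--             res.append(a[i]); i += 1; j += 1
--     res.extend(a[i:])
--     res.extend(b[j:])
--     return dict(res)
-- ===== Notes on version B (the rewrite author's own statement) =====
-- stated objective: alternative
-- what changed: B sorts each dict's items separately and combines them with a two-pointer merge of the two sorted lists (dict1 winning key ties), instead of A's sort of the concatenated key list with a per-key linear membership scan and dict lookups.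
import Mathlib
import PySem

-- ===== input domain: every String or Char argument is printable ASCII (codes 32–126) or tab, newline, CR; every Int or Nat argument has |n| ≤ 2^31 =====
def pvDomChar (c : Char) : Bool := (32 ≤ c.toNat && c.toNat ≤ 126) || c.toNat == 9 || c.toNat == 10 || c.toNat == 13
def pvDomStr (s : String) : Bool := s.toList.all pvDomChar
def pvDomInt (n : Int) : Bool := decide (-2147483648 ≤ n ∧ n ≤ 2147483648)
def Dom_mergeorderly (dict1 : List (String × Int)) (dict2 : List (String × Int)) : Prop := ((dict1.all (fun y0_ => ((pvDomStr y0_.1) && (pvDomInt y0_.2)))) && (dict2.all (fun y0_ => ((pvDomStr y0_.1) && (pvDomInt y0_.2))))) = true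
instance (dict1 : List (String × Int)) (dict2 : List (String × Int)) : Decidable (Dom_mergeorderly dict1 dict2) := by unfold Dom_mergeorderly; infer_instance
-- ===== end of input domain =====

-- B sorts each dict's items separately and combines them by a two-pointer merge of
-- the two sorted lists (dict1 winning key ties), replacing A's sort of the
-- concatenated key list with its per-key membership scan (objective: alternative).

-- ===== PORT A =====
def mergeorderly (dict1 : List (String × Int)) (dict2 : List (String × Int)) : List (String × Int) :=
  let d1 : PySem.Dict String Int := PySem.Dict.mk dict1
  let d2 : PySem.Dict String Int := PySem.Dict.mk dict2
  let list1 := d1.keys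
  let list2 := d2.keys
  let lst := PySem.List.sorted (list1 ++ list2) (fun k => k)
  let merged := lst.foldl (fun merged key =>
      if list1.contains key then merged.insert key (d1.getD key 0)   -- dict1[key]: key ∈ list1, present
      else merged.insert key (d2.getD key 0)) PySem.Dict.empty       -- dict2[key]: key ∈ list2, present
  merged.items

-- ===== PORT B =====
-- the two-pointer while loop of Source B, as recursion on the two sorted lists
def pvMerge : List (String × Int) → List (String × Int) → List (String × Int)
  | [], ys => ys                                                     -- res.extend(b[j:])
  | x :: xs, [] => x :: xs                                           -- res.extend(a[i:])
  | x :: xs, y :: ys =>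
      if x.1 < y.1 then x :: pvMerge xs (y :: ys)
      else if y.1 < x.1 then y :: pvMerge (x :: xs) ys
      else x :: pvMerge xs ys

def mergeorderly_alt (dict1 : List (String × Int)) (dict2 : List (String × Int)) : List (String × Int) :=
  let a := PySem.List.sorted dict1 (fun kv => kv.1)                  -- sorted(dict1.items(), key=…)
  let b := PySem.List.sorted dict2 (fun kv => kv.1)
  (PySem.Dict.ofList (pvMerge a b)).items                            -- dict(res)

-- ===== PRECONDITION & SPEC =====
-- Pre_ is the dict-representation invariant: the association lists stand for Python
-- dicts, whose keys are necessarily distinct; it excludes no actual Python input.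
def Pre_mergeorderly (dict1 : List (String × Int)) (dict2 : List (String × Int)) : Prop :=
  (dict1.map Prod.fst).Nodup ∧ (dict2.map Prod.fst).Nodup
instance (dict1 : List (String × Int)) (dict2 : List (String × Int)) : Decidable (Pre_mergeorderly dict1 dict2) := by unfold Pre_mergeorderly; infer_instance
def pvWitness_mergeorderly : (List (String × Int)) × (List (String × Int)) :=
  ([("b", 2), ("a", 1)], [("a", 7), ("c", 3)])

def Spec_mergeorderly (dict1 : List (String × Int)) (dict2 : List (String × Int)) (out : List (String × Int)) : Prop := out = mergeorderly_alt dict1 dict2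
instance (dict1 : List (String × Int)) (dict2 : List (String × Int)) (out : List (String × Int)) : Decidable (Spec_mergeorderly dict1 dict2 out) := by unfold Spec_mergeorderly; infer_instance

-- ===== CLAIM (what is proved, stated in full; the proofs are below) =====
def Claim_equal_mergeorderly : Prop := ∀ (dict1 : List (String × Int)) (dict2 : List (String × Int)), Dom_mergeorderly dict1 dict2 → Pre_mergeorderly dict1 dict2 → Spec_mergeorderly dict1 dict2 (mergeorderly dict1 dict2)

-- ===== LEMMAS AND PROOFS =====

-- get? of a fold that inserts key-dependent values (the value does not depend on the
-- accumulator), for any list of keys, duplicates included.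
theorem pv_get?_foldl_insert_fun (v : String → Int) :
    ∀ (L : List String) (d : PySem.Dict String Int) (x : String),
      (L.foldl (fun m k => m.insert k (v k)) d).get? x
        = if x ∈ L then some (v x) else d.get? x := by
  intro L
  induction L with
  | nil => intro d x; simp
  | cons k L ih =>
      intro d x
      rw [List.foldl_cons, ih]
      by_cases hx : x ∈ L
      · simp [hx]
      · by_cases hk : x = k
        · subst hk; simp [hx, PySem.Dict.get?_insert_self]
        · simp [hx, hk, PySem.Dict.get?_insert]

-- PySem.Set.ofList keeps first occurrences, so it is a sublist.
theorem pv_ofList_sublist : ∀ (xs : List String), List.Sublist (PySem.Set.ofList xs) xs := by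
  intro xs
  induction xs with
  | nil => simp [PySem.Set.ofList, PySem.Set.empty]
  | cons x xs ih =>
      rw [PySem.Set.ofList_cons]
      refine List.Sublist.cons₂ x (List.Sublist.trans ?_ ih)
      simp only [PySem.Set.discard]
      exact List.filter_sublist

theorem pv_pairwise_lt_of_le_nodup (L : List String)
    (h1 : L.Pairwise (fun a b => a ≤ b)) (h2 : L.Nodup) :
    L.Pairwise (fun a b => a < b) :=
  (h1.and h2).imp fun h => lt_of_le_of_ne h.1 h.2

-- dict(res) with distinct keys is res again
theorem pv_items_ofList_nodup (xs : List (String × Int)) (h : (xs.map Prod.fst).Nodup) :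
    (PySem.Dict.ofList xs).items = xs := by
  have := PySem.Dict.items_foldl_insert_fresh (l := xs) (k := Prod.fst) (v := Prod.snd)
    (d := PySem.Dict.empty) (by simp) h
  simpa using this

-- the merged list's keys are the union of the two key lists
theorem pv_mem_keys_merge (k : String) :
    ∀ (A B : List (String × Int)),
      (k ∈ (pvMerge A B).map Prod.fst) ↔ k ∈ A.map Prod.fst ∨ k ∈ B.map Prod.fst := by
  intro A
  induction A with
  | nil => intro B; simp [pvMerge]
  | cons x xs ihA =>
      intro B
      induction B with
      | nil => simp [pvMerge]
      | cons y ys ihB =>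
          by_cases h1 : x.1 < y.1
          · simp only [pvMerge, if_pos h1, List.map_cons, List.mem_cons, ihA (y :: ys)]
            tauto
          · by_cases h2 : y.1 < x.1
            · simp only [pvMerge, if_neg h1, if_pos h2, List.map_cons, List.mem_cons] at ihB ⊢
              rw [ihB]; tauto
            · have hxy : x.1 = y.1 := le_antisymm (not_lt.mp h2) (not_lt.mp h1)
              simp only [pvMerge, if_neg h1, if_neg h2, List.map_cons, List.mem_cons, ihA ys]
              constructor
              · rintro (h | h | h) <;> tauto
              · rintro ((h | h) | (h | h)) <;> simp [h, hxy]

-- weak membership: every merged pair comes from one of the inputs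
theorem pv_mem_merge_weak (p : String × Int) :
    ∀ (A B : List (String × Int)), p ∈ pvMerge A B → p ∈ A ∨ p ∈ B := by
  intro A
  induction A with
  | nil => intro B h; right; simpa [pvMerge] using h
  | cons x xs ihA =>
      intro B
      induction B with
      | nil => intro h; left; simpa [pvMerge] using h
      | cons y ys ihB =>
          intro h
          by_cases h1 : x.1 < y.1
          · rw [pvMerge, if_pos h1] at h
            rcases List.mem_cons.mp h with h | h
            · exact Or.inl (by simp [h])
            · rcases ihA (y :: ys) h with h | h
              · exact Or.inl (List.mem_cons_of_mem _ h)
              · exact Or.inr h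
          · by_cases h2 : y.1 < x.1
            · rw [pvMerge, if_neg h1, if_pos h2] at h
              rcases List.mem_cons.mp h with h | h
              · exact Or.inr (by simp [h])
              · rcases ihB h with h | h
                · exact Or.inl h
                · exact Or.inr (List.mem_cons_of_mem _ h)
            · rw [pvMerge, if_neg h1, if_neg h2] at h
              rcases List.mem_cons.mp h with h | h
              · exact Or.inl (by simp [h])
              · rcases ihA ys h with h | h
                · exact Or.inl (List.mem_cons_of_mem _ h)
                · exact Or.inr (List.mem_cons_of_mem _ h)

-- merging two strictly key-sorted lists is strictly key-sorted
theorem pv_pairwise_merge :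
    ∀ (A B : List (String × Int)),
      A.Pairwise (fun p q => p.1 < q.1) → B.Pairwise (fun p q => p.1 < q.1) →
      (pvMerge A B).Pairwise (fun p q => p.1 < q.1) := by
  intro A
  induction A with
  | nil => intro B _ hB; simpa [pvMerge] using hB
  | cons x xs ihA =>
      intro B
      induction B with
      | nil => intro hA _; simpa [pvMerge] using hA
      | cons y ys ihB =>
          intro hA hB
          obtain ⟨hx, hxs⟩ := List.pairwise_cons.mp hA
          obtain ⟨hy, hys⟩ := List.pairwise_cons.mp hB
          by_cases h1 : x.1 < y.1
          · rw [pvMerge, if_pos h1]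
            refine List.pairwise_cons.mpr ⟨?_, ihA (y :: ys) hxs hB⟩
            intro p hp
            rcases pv_mem_merge_weak p xs (y :: ys) hp with h | h
            · exact hx p h
            · rcases List.mem_cons.mp h with h | h
              · rw [h]; exact h1
              · exact lt_trans h1 (hy p h)
          · by_cases h2 : y.1 < x.1
            · rw [pvMerge, if_neg h1, if_pos h2]
              refine List.pairwise_cons.mpr ⟨?_, ihB hA hys⟩
              intro p hp
              rcases pv_mem_merge_weak p (x :: xs) ys hp with h | h
              · rcases List.mem_cons.mp h with h | h
                · rw [h]; exact h2
                · exact lt_trans h2 (hx p h)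
              · exact hy p h
            · have hxy : x.1 = y.1 := le_antisymm (not_lt.mp h2) (not_lt.mp h1)
              rw [pvMerge, if_neg h1, if_neg h2]
              refine List.pairwise_cons.mpr ⟨?_, ihA ys hxs hys⟩
              intro p hp
              rcases pv_mem_merge_weak p xs ys hp with h | h
              · exact hx p h
              · rw [hxy]; exact hy p h

-- precedence: a merged pair is from A, or from B with its key absent from A
theorem pv_mem_merge (p : String × Int) :
    ∀ (A B : List (String × Int)),
      A.Pairwise (fun p q => p.1 < q.1) → B.Pairwise (fun p q => p.1 < q.1) →
      p ∈ pvMerge A B → p ∈ A ∨ (p ∈ B ∧ p.1 ∉ A.map Prod.fst) := by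
  intro A
  induction A with
  | nil => intro B _ _ h; right; exact ⟨by simpa [pvMerge] using h, by simp⟩
  | cons x xs ihA =>
      intro B
      induction B with
      | nil => intro _ _ h; left; simpa [pvMerge] using h
      | cons y ys ihB =>
          intro hA hB h
          obtain ⟨hx, hxs⟩ := List.pairwise_cons.mp hA
          obtain ⟨hy, hys⟩ := List.pairwise_cons.mp hB
          by_cases h1 : x.1 < y.1
          · rw [pvMerge, if_pos h1] at h
            rcases List.mem_cons.mp h with h | h
            · exact Or.inl (by simp [h])
            · rcases ihA (y :: ys) hxs hB h with h' | ⟨hmem, hnot⟩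
              · exact Or.inl (List.mem_cons_of_mem _ h')
              · refine Or.inr ⟨hmem, ?_⟩
                have hpk : x.1 < p.1 := by
                  rcases List.mem_cons.mp hmem with h'' | h''
                  · rw [h'']; exact h1
                  · exact lt_trans h1 (hy p h'')
                simpa [List.map_cons, List.mem_cons, ne_of_gt hpk] using hnot
          · by_cases h2 : y.1 < x.1
            · rw [pvMerge, if_neg h1, if_pos h2] at h
              rcases List.mem_cons.mp h with h | h
              · refine Or.inr ⟨by simp [h], ?_⟩
                rw [h]
                simp only [List.map_cons, List.mem_cons]
                push Not
                refine ⟨ne_of_lt h2, ?_⟩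
                intro hmem
                rcases List.mem_map.mp hmem with ⟨q, hq, hqk⟩
                exact absurd (hqk ▸ lt_trans h2 (hx q hq)) (lt_irrefl _)
              · rcases ihB hA hys h with h' | ⟨hmem, hnot⟩
                · exact Or.inl h'
                · exact Or.inr ⟨List.mem_cons_of_mem _ hmem, hnot⟩
            · have hxy : x.1 = y.1 := le_antisymm (not_lt.mp h2) (not_lt.mp h1)
              rw [pvMerge, if_neg h1, if_neg h2] at h
              rcases List.mem_cons.mp h with h | h
              · exact Or.inl (by simp [h])
              · rcases ihA ys hxs hys h with h' | ⟨hmem, hnot⟩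
                · exact Or.inl (List.mem_cons_of_mem _ h')
                · refine Or.inr ⟨List.mem_cons_of_mem _ hmem, ?_⟩
                  have hpk : x.1 < p.1 := hxy ▸ hy p hmem
                  simpa [List.map_cons, List.mem_cons, ne_of_gt hpk] using hnot

-- the common characterisation both ports reduce to
theorem pv_char (dict1 dict2 : List (String × Int))
    (h1 : (dict1.map Prod.fst).Nodup) (h2 : (dict2.map Prod.fst).Nodup) :
    mergeorderly dict1 dict2 = mergeorderly_alt dict1 dict2 := by
  set K1 : List String := dict1.map Prod.fst with hK1
  set K2 : List String := dict2.map Prod.fst with hK2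
  set v : String → Int := fun k =>
    if K1.contains k then (PySem.Dict.mk dict1).getD k 0
    else (PySem.Dict.mk dict2).getD k 0 with hv
  set sortedA : List String := PySem.List.sorted (K1 ++ K2) (fun k => k) with hsA
  set D : List String := PySem.Set.ofList sortedA with hD
  have hDnd : D.Nodup := PySem.Set.nodup_ofList _
  have hDlt : D.Pairwise (fun a b => a < b) :=
    pv_pairwise_lt_of_le_nodup _
      ((PySem.List.sorted_pairwise (K1 ++ K2) (fun k => k)).sublist (pv_ofList_sublist sortedA))
      hDnd
  have hDmem : ∀ k, k ∈ D ↔ k ∈ K1 ∨ k ∈ K2 := by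
    intro k
    rw [hD, PySem.Set.mem_ofList, hsA, PySem.List.mem_sorted, List.mem_append]
  -- ===== A's side: mergeorderly = D.map (fun k => (k, v k)) =====
  have hA : mergeorderly dict1 dict2
      = (sortedA.foldl (fun m k => m.insert k (v k)) PySem.Dict.empty).items := by
    show ((PySem.List.sorted (K1 ++ K2) (fun k => k)).foldl
        (fun m k => if K1.contains k then m.insert k ((PySem.Dict.mk dict1).getD k 0)
                    else m.insert k ((PySem.Dict.mk dict2).getD k 0))
        PySem.Dict.empty).items = _
    rw [← hsA]
    congr 2
    funext m k
    rw [hv]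
    exact (apply_ite (m.insert k) _ _ _).symm
  have hKA : (sortedA.foldl (fun m k => m.insert k (v k)) PySem.Dict.empty).keys = D := by
    have := PySem.Dict.keys_foldl_insert (ν := Int) sortedA (fun _ k => v k) PySem.Dict.empty
    simpa [PySem.Set.update_empty, hD] using this
  have hAchar : mergeorderly dict1 dict2 = D.map (fun k => (k, v k)) := by
    rw [hA, PySem.Dict.items_eq_map_keys _ (by rw [hKA]; exact hDnd) 0, hKA]
    apply List.map_congr_left
    intro k hk
    have hkA : k ∈ sortedA := (pv_ofList_sublist sortedA).mem (hD ▸ hk)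
    rw [PySem.Dict.getD_eq_get?_getD, pv_get?_foldl_insert_fun]
    simp [hkA]
  -- ===== B's side: mergeorderly_alt = D.map (fun k => (k, v k)) =====
  set a : List (String × Int) := PySem.List.sorted dict1 (fun kv => kv.1) with ha
  set b : List (String × Int) := PySem.List.sorted dict2 (fun kv => kv.1) with hb
  have hpa : a.Perm dict1 := PySem.List.sorted_perm _ _ _
  have hpb : b.Perm dict2 := PySem.List.sorted_perm _ _ _
  have hka : (a.map Prod.fst).Perm K1 := hpa.map _
  have hkb : (b.map Prod.fst).Perm K2 := hpb.map _
  have halt : a.Pairwise (fun p q => p.1 < q.1) := by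
    have hle : a.Pairwise (fun p q => p.1 ≤ q.1) := by
      have := PySem.List.sorted_pairwise dict1 (fun kv => kv.1)
      rwa [← ha] at this
    have hnd : (a.map Prod.fst).Nodup := hka.nodup_iff.mpr h1
    exact List.pairwise_map.mp
      (pv_pairwise_lt_of_le_nodup _ (List.pairwise_map.mpr hle) hnd)
  have hblt : b.Pairwise (fun p q => p.1 < q.1) := by
    have hle : b.Pairwise (fun p q => p.1 ≤ q.1) := by
      have := PySem.List.sorted_pairwise dict2 (fun kv => kv.1)
      rwa [← hb] at this
    have hnd : (b.map Prod.fst).Nodup := hkb.nodup_iff.mpr h2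
    exact List.pairwise_map.mp
      (pv_pairwise_lt_of_le_nodup _ (List.pairwise_map.mpr hle) hnd)
  set M : List (String × Int) := pvMerge a b with hM
  have hMlt : M.Pairwise (fun p q => p.1 < q.1) := pv_pairwise_merge a b halt hblt
  have hMklt : (M.map Prod.fst).Pairwise (fun s t => s < t) := List.pairwise_map.mpr hMlt
  have hMknd : (M.map Prod.fst).Nodup := hMklt.imp fun h => ne_of_lt h
  have hMkmem : ∀ k, k ∈ M.map Prod.fst ↔ k ∈ K1 ∨ k ∈ K2 := by
    intro k
    rw [hM, pv_mem_keys_merge k a b, hka.mem_iff, hkb.mem_iff]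
  -- keys of M coincide with D
  have hMkeys : M.map Prod.fst = D := by
    have hperm : (M.map Prod.fst).Perm D := by
      rw [List.perm_ext_iff_of_nodup hMknd hDnd]
      intro k; rw [hMkmem k, hDmem k]
    have e1 : PySem.List.sorted (M.map Prod.fst) (fun k => k) = M.map Prod.fst :=
      PySem.List.sorted_eq_of_perm_of_pairwise_lt _ _ _ (List.Perm.refl _) hMklt
    have e2 : PySem.List.sorted (M.map Prod.fst) (fun k => k) = D :=
      PySem.List.sorted_eq_of_perm_of_pairwise_lt _ _ _ hperm.symm hDlt
    exact e1.symm.trans e2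
  -- values of M are A's branch value
  have hMval : ∀ p ∈ M, p.2 = v p.1 := by
    intro p hp
    rcases pv_mem_merge p a b halt hblt hp with h | ⟨hmem, hnot⟩
    · have hp1 : p ∈ dict1 := hpa.mem_iff.mp h
      have hk1 : p.1 ∈ K1 := hK1 ▸ List.mem_map.mpr ⟨p, hp1, rfl⟩
      have hval := PySem.Dict.getD_of_mem_items (d := PySem.Dict.mk dict1) (k := p.1) (v := p.2)
        (by simpa using hp1) (by simpa using h1) 0
      simp only [hv]
      rw [if_pos (by simpa using hk1)]
      exact hval.symm
    · have hp2 : p ∈ dict2 := hpb.mem_iff.mp hmem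
      have hk1 : p.1 ∉ K1 := by rw [hK1]; rwa [hka.mem_iff] at hnot
      have hval := PySem.Dict.getD_of_mem_items (d := PySem.Dict.mk dict2) (k := p.1) (v := p.2)
        (by simpa using hp2) (by simpa using h2) 0
      simp only [hv]
      rw [if_neg (by simpa using hk1)]
      exact hval.symm
  have hBchar : mergeorderly_alt dict1 dict2 = D.map (fun k => (k, v k)) := by
    show (PySem.Dict.ofList (pvMerge a b)).items = _
    rw [← hM, pv_items_ofList_nodup M hMknd, ← hMkeys, List.map_map]
    have hid : List.map ((fun k => (k, v k)) ∘ Prod.fst) M = List.map id M := by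
      apply List.map_congr_left
      intro p hp
      obtain ⟨k, w⟩ := p
      have hw := hMval (k, w) hp
      simp only at hw
      simp only [Function.comp_apply, id_eq]
      rw [hw]
    rw [hid, List.map_id]
  rw [hAchar, hBchar]

-- ===== VERDICT (by name: the statement is the Claim_ definition above) =====
theorem mergeorderly_spec : Claim_equal_mergeorderly := by
  intro dict1 dict2 _ hpre
  exact pv_char dict1 dict2 hpre.1 hpre.2
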